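-- pv_equiv track=rewrite | github.com/ManojSingh0302/hackerrank | Python/basicIntroductionChallenges/meetup_schedule.py | countMeetings
-- ===== SOURCE A (Python) =====
-- def countMeetings(firstDay, lastDay):
--     # set containing all unique days possible
--     days_full_set = set(list(range(min(firstDay), max(lastDay) + 1)))
--
--     # count of possible meetings
--     mtng_cnt = 0
--
--     # assuming all the investors have a defined firstDay and lastDay
--     # that is, len(firstDay) = len(lastDay)
--     # iterating through investors - one at a time
--     for i in range(len(firstDay)):
--
--         # if there are no meeting days left, break out of the loop
--         if not bool(days_full_set):
--             break
--
--         # check for the day availability starting from the first day for the current investor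
--         for val in range(firstDay[i], lastDay[i] + 1):
--             if val in days_full_set:
--                 days_full_set.remove(val)
--                 mtng_cnt += 1
--                 break
--
--     # return the consolidated meeting count
--     return mtng_cnt
-- ===== SOURCE B (Python) =====
-- def countMeetings(firstDay, lastDay):
--     # Sorted list of the distinct candidate days (range is already sorted & duplicate-free).
--     free = list(range(min(firstDay), max(lastDay) + 1))
--     cnt = 0
--     for f, l in zip(firstDay, lastDay):
--         # binary search: index of the first remaining free day >= f
--         lo, hi = 0, len(free)
--         while lo < hi:
--             mid = (lo + hi) // 2
--             if free[mid] < f: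
--                 lo = mid + 1
--             else:
--                 hi = mid
--         if lo < len(free) and free[lo] <= l:
--             free.pop(lo)
--             cnt += 1
--     return cnt
-- ===== Notes on version B (the rewrite author's own statement) =====
-- stated objective: alternative
-- what changed: Replaces A's hash-set of days with the inner linear scan over every day value in [firstDay[i], lastDay[i]] by a sorted free-day list queried with a hand-written binary search (first free day >= firstDay[i]) and an indexed pop, so no per-day membership scanning remains.
-- outside the precondition, e.g. on countMeetings([0, 1], [0]): A returns 1, B returns 1
import Mathlib
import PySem

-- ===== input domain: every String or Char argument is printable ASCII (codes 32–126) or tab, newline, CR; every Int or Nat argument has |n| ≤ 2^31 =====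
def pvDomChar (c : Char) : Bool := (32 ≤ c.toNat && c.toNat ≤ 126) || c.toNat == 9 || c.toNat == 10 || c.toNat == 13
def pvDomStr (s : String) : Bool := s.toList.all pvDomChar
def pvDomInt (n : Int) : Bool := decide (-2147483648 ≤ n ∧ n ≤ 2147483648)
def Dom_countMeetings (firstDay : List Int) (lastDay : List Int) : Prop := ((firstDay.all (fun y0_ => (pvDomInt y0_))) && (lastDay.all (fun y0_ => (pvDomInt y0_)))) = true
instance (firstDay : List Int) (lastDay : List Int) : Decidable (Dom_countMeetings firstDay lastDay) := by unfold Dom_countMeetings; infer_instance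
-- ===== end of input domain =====

-- B replaces A's per-day membership scan over a hash set by a sorted free-day list with a
-- hand-written binary search and an indexed pop (objective: alternative algorithm, same cost class).

-- ===== PORT A =====
-- inner loop: 'for val in range(f, l+1): if val in days_full_set: …' — returns the first member hit
def pvScanA (s : PySem.Set Int) : List Int → Option Int
  | [] => none
  | v :: vs => if s.contains v then some v else pvScanA s vs

-- outer loop over investors i (structural recursion over the two lists in lockstep;
-- the '_ :: _, []' case is where Python raises IndexError — outside Pre_)
def pvLoopA : List Int → List Int → PySem.Set Int → Int → Int
  | [], _, _, cnt => cnt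
  | _ :: _, [], _, cnt => cnt
  | f :: fs, l :: ls, s, cnt =>
    if s.isEmpty then cnt
    else
      match pvScanA s (PySem.List.pyRange f (l + 1) 1) with
      | some v => pvLoopA fs ls (PySem.Set.discard s v) (cnt + 1)  -- s.remove(v): v ∈ s is guaranteed by the branch
      | none => pvLoopA fs ls s cnt

-- set(list(range(lo, hi+1))): the range list is duplicate-free, so the built set holds exactly
-- these elements in this order — PySem.Set.ofList (pyRange lo (hi+1) 1) = pyRange lo (hi+1) 1
-- by PySem.Set.ofList_eq_self_of_nodup and PySem.List.nodup_pyRange_one (ofList itself is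
-- quadratic, which makes the port unevaluatable on wide day ranges; the set is the same).
def countMeetings (firstDay : List Int) (lastDay : List Int) : Int :=
  let lo := (PySem.List.min? firstDay (fun x => x)).getD 0
  let hi := (PySem.List.max? lastDay (fun x => x)).getD 0
  pvLoopA firstDay lastDay (PySem.List.pyRange lo (hi + 1) 1 : PySem.Set Int) 0

-- ===== PORT B =====
-- hand-written binary search of Source B: first index j in [lo,hi) with free[j] >= x
-- (free.getD mid 0 is exact for Python's free[mid]: inside the loop mid < hi ≤ len(free))
def pvBisect (free : List Int) (x : Int) (lo hi : Nat) : Nat :=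
  if lo < hi then
    let mid := (lo + hi) / 2
    if free.getD mid 0 < x then pvBisect free x (mid + 1) hi else pvBisect free x lo mid
  else lo
termination_by hi - lo
decreasing_by all_goals omega

-- 'for f, l in zip(firstDay, lastDay)' with the sorted free list and the count
def pvLoopB : List (Int × Int) → List Int → Int → Int
  | [], _, cnt => cnt
  | (f, l) :: rest, free, cnt =>
    let j := pvBisect free f 0 free.length
    if j < free.length ∧ free.getD j 0 ≤ l then
      pvLoopB rest (free.eraseIdx j) (cnt + 1)  -- free.pop(j) at a valid index
    else pvLoopB rest free cnt

def countMeetings_alt (firstDay : List Int) (lastDay : List Int) : Int :=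
  let lo := (PySem.List.min? firstDay (fun x => x)).getD 0
  let hi := (PySem.List.max? lastDay (fun x => x)).getD 0
  pvLoopB (firstDay.zip lastDay) (PySem.List.pyRange lo (hi + 1) 1) 0

-- ===== PRECONDITION & SPEC =====
-- Pre_ excludes empty firstDay/lastDay (min()/max() raise ValueError) and ragged inputs with
-- len(lastDay) < len(firstDay), on which A's lastDay[i] generally raises IndexError and any
-- returned value (when the free set happens to empty first) is an accident of the early break.
def Pre_countMeetings (firstDay : List Int) (lastDay : List Int) : Prop :=
  firstDay ≠ [] ∧ firstDay.length ≤ lastDay.length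
instance (firstDay : List Int) (lastDay : List Int) : Decidable (Pre_countMeetings firstDay lastDay) := by
  unfold Pre_countMeetings; infer_instance

def pvWitness_countMeetings : List Int × List Int := ([1, 3, 2], [2, 4, 2])

def Spec_countMeetings (firstDay : List Int) (lastDay : List Int) (out : Int) : Prop := out = countMeetings_alt firstDay lastDay
instance (firstDay : List Int) (lastDay : List Int) (out : Int) : Decidable (Spec_countMeetings firstDay lastDay out) := by unfold Spec_countMeetings; infer_instance

-- ===== CLAIM (what is proved, stated in full; the proofs are below) =====
def Claim_equal_countMeetings : Prop := ∀ (firstDay : List Int) (lastDay : List Int), Dom_countMeetings firstDay lastDay → Pre_countMeetings firstDay lastDay → Spec_countMeetings firstDay lastDay (countMeetings firstDay lastDay)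

-- ===== LEMMAS AND PROOFS =====

-- binary-search invariant: pvBisect returns a split point of the sorted list around x
theorem pvBisect_spec (free : List Int) (x : Int) (hs : free.Pairwise (· < ·))
    (lo hi : Nat) (hhi : hi ≤ free.length) (hlolen : lo ≤ free.length)
    (hlo : ∀ j (hj : j < free.length), j < lo → free[j] < x)
    (hhi2 : ∀ j (hj : j < free.length), hi ≤ j → x ≤ free[j]) :
    pvBisect free x lo hi ≤ free.length ∧
    (∀ j (hj : j < free.length), j < pvBisect free x lo hi → free[j] < x) ∧
    (∀ j (hj : j < free.length), pvBisect free x lo hi ≤ j → x ≤ free[j]) := by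
  have hmono : ∀ i j (hi' : i < free.length) (hj' : j < free.length), i < j → free[i] < free[j] :=
    fun i j hi' hj' hij => (List.pairwise_iff_getElem.mp hs) i j hi' hj' hij
  suffices H : ∀ d lo hi, hi - lo = d → hi ≤ free.length → lo ≤ free.length →
      (∀ j (hj : j < free.length), j < lo → free[j] < x) →
      (∀ j (hj : j < free.length), hi ≤ j → x ≤ free[j]) →
      pvBisect free x lo hi ≤ free.length ∧
      (∀ j (hj : j < free.length), j < pvBisect free x lo hi → free[j] < x) ∧
      (∀ j (hj : j < free.length), pvBisect free x lo hi ≤ j → x ≤ free[j]) by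
    exact H _ lo hi rfl hhi hlolen hlo hhi2
  intro d
  induction d using Nat.strong_induction_on with
  | _ d ih =>
  intro lo hi hd hhi hlolen hlo hhi2
  by_cases hlt : lo < hi
  · have hmidlt : (lo + hi) / 2 < hi := by omega
    have hmidge : lo ≤ (lo + hi) / 2 := by omega
    have hmidlen : (lo + hi) / 2 < free.length := by omega
    have hget : free.getD ((lo + hi) / 2) 0 = free[(lo + hi) / 2] :=
      List.getD_eq_getElem free 0 hmidlen
    by_cases hcond : free.getD ((lo + hi) / 2) 0 < x
    · have hval : pvBisect free x lo hi = pvBisect free x ((lo + hi) / 2 + 1) hi := by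
        conv_lhs => rw [pvBisect]
        rw [if_pos hlt]; exact if_pos hcond
      rw [hval]
      refine ih (hi - ((lo + hi) / 2 + 1)) (by omega) _ _ rfl hhi (by omega) ?_ hhi2
      intro j hj hjlt
      rcases Nat.lt_or_ge j ((lo + hi) / 2) with h | h
      · exact lt_trans (hmono j _ hj hmidlen h) (hget ▸ hcond)
      · have : j = (lo + hi) / 2 := by omega
        subst this; exact hget ▸ hcond
    · have hval : pvBisect free x lo hi = pvBisect free x lo ((lo + hi) / 2) := by
        conv_lhs => rw [pvBisect]
        rw [if_pos hlt]; exact if_neg hcond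
      rw [hval]
      refine ih ((lo + hi) / 2 - lo) (by omega) _ _ rfl (by omega) hlolen hlo ?_
      intro j hj hjge
      have hxm : x ≤ free[(lo + hi) / 2] := by rw [← hget]; omega
      rcases Nat.eq_or_lt_of_le hjge with h | h
      · exact h ▸ hxm
      · exact le_of_lt (lt_of_le_of_lt hxm (hmono _ j hmidlen hj h))
  · have hval : pvBisect free x lo hi = lo := by
      conv_lhs => rw [pvBisect]
      exact if_neg hlt
    rw [hval]
    exact ⟨hlolen, hlo, fun j hj hjge => hhi2 j hj (by omega)⟩

theorem pvBisect_unique (free : List Int) (x : Int) (r1 r2 : Nat)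
    (h1 : r1 ≤ free.length) (h2 : r2 ≤ free.length)
    (p1 : ∀ j (hj : j < free.length), j < r1 → free[j] < x)
    (q1 : ∀ j (hj : j < free.length), r1 ≤ j → x ≤ free[j])
    (p2 : ∀ j (hj : j < free.length), j < r2 → free[j] < x)
    (q2 : ∀ j (hj : j < free.length), r2 ≤ j → x ≤ free[j]) : r1 = r2 := by
  rcases Nat.lt_trichotomy r1 r2 with h | h | h
  · have hr1 : r1 < free.length := by omega
    have := p2 r1 hr1 h
    have := q1 r1 hr1 le_rfl
    omega
  · exact h
  · have hr2 : r2 < free.length := by omega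
    have := p1 r2 hr2 h
    have := q2 r2 hr2 le_rfl
    omega

-- A's ascending scan over the day values of [f, l] equals B's binary-search probe of the sorted free list
theorem pvScanA_eq (f l : Int) (free : List Int) (hs : free.Pairwise (· < ·)) :
    pvScanA free (PySem.List.pyRange f (l + 1) 1) =
      (if _h : pvBisect free f 0 free.length < free.length ∧ free.getD (pvBisect free f 0 free.length) 0 ≤ l
       then some (free.getD (pvBisect free f 0 free.length) 0) else none) := by
  have hmono : ∀ i j (hi' : i < free.length) (hj' : j < free.length), i < j → free[i] < free[j] :=
    fun i j hi' hj' hij => (List.pairwise_iff_getElem.mp hs) i j hi' hj' hij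
  have hspec : ∀ x : Int,
      pvBisect free x 0 free.length ≤ free.length ∧
      (∀ j (hj : j < free.length), j < pvBisect free x 0 free.length → free[j] < x) ∧
      (∀ j (hj : j < free.length), pvBisect free x 0 free.length ≤ j → x ≤ free[j]) := by
    intro x
    refine pvBisect_spec free x hs 0 free.length le_rfl (Nat.zero_le _) ?_ ?_
    · intro j hj h; omega
    · intro j hj h; omega
  suffices H : ∀ d f, (l + 1 - f).toNat = d →
      pvScanA free (PySem.List.pyRange f (l + 1) 1) =
      (if _h : pvBisect free f 0 free.length < free.length ∧ free.getD (pvBisect free f 0 free.length) 0 ≤ l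
       then some (free.getD (pvBisect free f 0 free.length) 0) else none) by
    exact H _ f rfl
  intro d
  induction d using Nat.strong_induction_on with
  | _ d ih =>
  intro f hd
  obtain ⟨hb1, hb2, hb3⟩ := hspec f
  by_cases hfl : l + 1 ≤ f
  · rw [PySem.List.pyRange_one_eq_nil hfl]
    rw [dif_neg]
    · rfl
    · rintro ⟨h1, h2⟩
      have := hb3 _ h1 le_rfl
      rw [List.getD_eq_getElem free 0 h1] at h2
      omega
  · rw [PySem.List.pyRange_one_cons (by omega : f < l + 1)]
    by_cases hmem : f ∈ free
    · rw [pvScanA, if_pos ((PySem.Set.contains_iff free f).mpr hmem)]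
      obtain ⟨i, hi, hif⟩ := List.mem_iff_getElem.mp hmem
      have hni : pvBisect free f 0 free.length ≤ i := by
        rcases Nat.lt_or_ge i (pvBisect free f 0 free.length) with hc | hc
        · have := hb2 i hi hc; omega
        · exact hc
      have hnlen : pvBisect free f 0 free.length < free.length := lt_of_le_of_lt hni hi
      have hgef : f ≤ free[pvBisect free f 0 free.length] := hb3 _ hnlen le_rfl
      have heq : free[pvBisect free f 0 free.length] = f := by
        rcases Nat.eq_or_lt_of_le hni with h | h
        · simp only [h]; exact hif
        · have := hmono _ i hnlen hi h
          omega
      rw [dif_pos ⟨hnlen, by rw [List.getD_eq_getElem free 0 hnlen, heq]; omega⟩]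
      rw [List.getD_eq_getElem free 0 hnlen, heq]
    · have hcont : ¬ PySem.Set.contains free f = true := by
        simp only [PySem.Set.contains_iff]; exact hmem
      rw [pvScanA, if_neg hcont]
      rw [ih ((l + 1 - (f + 1)).toNat) (by omega) (f + 1) rfl]
      obtain ⟨hc1, hc2, hc3⟩ := hspec (f + 1)
      have hnn : pvBisect free (f + 1) 0 free.length = pvBisect free f 0 free.length := by
        refine pvBisect_unique free (f + 1) _ _ hc1 hb1 hc2 hc3 ?_ ?_
        · intro j hj hjlt
          have := hb2 j hj hjlt
          omega
        · intro j hj hjge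
          have h1 := hb3 j hj hjge
          have h2 : free[j] ≠ f := by
            intro hcontra
            exact hmem (hcontra ▸ List.getElem_mem hj)
          omega
      rw [hnn]

-- removing the hit value from the (strictly sorted) set is popping it at its index
theorem discard_eq_eraseIdx (free : List Int) (j : Nat) (hj : j < free.length)
    (hs : free.Pairwise (· < ·)) :
    PySem.Set.discard free free[j] = free.eraseIdx j := by
  have hmono : ∀ i j (hi' : i < free.length) (hj' : j < free.length), i < j → free[i] < free[j] :=
    fun i j hi' hj' hij => (List.pairwise_iff_getElem.mp hs) i j hi' hj' hij
  have hdec : List.take j free ++ free[j] :: List.drop (j + 1) free = free := by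
    rw [← List.drop_eq_getElem_cons hj, List.take_append_drop]
  rw [List.eraseIdx_eq_take_drop_succ]
  show List.filter (fun y => !(y == free[j])) free = _
  set v := free[j] with hv
  conv_lhs => rw [← hdec]
  rw [List.filter_append, List.filter_cons]
  have hhead : (!(v == v)) = false := by simp
  rw [hhead]
  have htake : List.filter (fun y => !(y == v)) (List.take j free) = List.take j free := by
    rw [List.filter_eq_self]
    intro a ha
    obtain ⟨i, hi, hia⟩ := List.mem_iff_getElem.mp ha
    have hilen : i < j := by
      have := hi; rw [List.length_take] at this; omega
    have hifree : i < free.length := by omega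
    have ha' : a = free[i] := by rw [← hia, List.getElem_take]
    have hlt := hmono i j hifree hj hilen
    have hne : a ≠ v := by rw [ha', hv]; omega
    simp [hne]
  have hdrop : List.filter (fun y => !(y == v)) (List.drop (j + 1) free) = List.drop (j + 1) free := by
    rw [List.filter_eq_self]
    intro a ha
    obtain ⟨i, hi, hia⟩ := List.mem_iff_getElem.mp ha
    have hifree : j + 1 + i < free.length := by
      have := hi; rw [List.length_drop] at this; omega
    have ha' : a = free[j + 1 + i] := by rw [← hia, List.getElem_drop]
    have hlt := hmono j (j + 1 + i) hj hifree (by omega)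
    have hne : a ≠ v := by rw [ha', hv]; omega
    simp [hne]
  rw [htake, hdrop]
  simp

theorem pvLoopB_nil_free (rest : List (Int × Int)) (cnt : Int) :
    pvLoopB rest [] cnt = cnt := by
  induction rest generalizing cnt with
  | nil => rfl
  | cons p rest ihr =>
    obtain ⟨f, l⟩ := p
    rw [pvLoopB]
    have hb : pvBisect [] f 0 0 = 0 := by rw [pvBisect]; norm_num
    simp only [hb, List.length_nil]
    rw [if_neg (by simp)]
    exact ihr cnt

theorem pvLoop_eq (fs ls : List Int) (free : List Int) (cnt : Int)
    (hs : free.Pairwise (· < ·)) :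
    pvLoopA fs ls free cnt = pvLoopB (fs.zip ls) free cnt := by
  induction fs generalizing ls free cnt with
  | nil => cases ls <;> rfl
  | cons f fs ih =>
    cases ls with
    | nil => rfl
    | cons l ls =>
      rw [List.zip_cons_cons]
      by_cases hfree : free = []
      · subst hfree
        rw [pvLoopB_nil_free]
        rfl
      · rw [pvLoopA, pvLoopB]
        rw [if_neg (by simpa [List.isEmpty_iff] using hfree)]
        rw [pvScanA_eq f l free hs]
        by_cases hcase : pvBisect free f 0 free.length < free.length ∧
            free.getD (pvBisect free f 0 free.length) 0 ≤ l
        · rw [dif_pos hcase, if_pos hcase]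
          have hget : free.getD (pvBisect free f 0 free.length) 0
              = free[pvBisect free f 0 free.length] := List.getD_eq_getElem free 0 hcase.1
          rw [hget]
          show pvLoopA fs ls
              (PySem.Set.discard free (free[pvBisect free f 0 free.length]'hcase.1)) (cnt + 1) = _
          rw [discard_eq_eraseIdx free _ hcase.1 hs]
          exact ih ls _ (cnt + 1)
            (List.Pairwise.sublist (List.eraseIdx_sublist free _) hs)
        · rw [dif_neg hcase, if_neg hcase]
          exact ih ls free cnt hs

-- ===== VERDICT (by name: the statement is the Claim_ definition above) =====
theorem countMeetings_spec : Claim_equal_countMeetings := by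
  intro firstDay lastDay _ _
  simp only [Spec_countMeetings, countMeetings, countMeetings_alt]
  exact pvLoop_eq _ _ _ _ (PySem.List.pairwise_lt_pyRange_one _ _)
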